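-- pv_equiv track=rewrite | github.com/gbasilveira/vera | interfaces/cli/commands/docs.py | _source_sort_key
-- ===== SOURCE A (Python) =====
-- def _source_sort_key(source: str) -> tuple[int, str]:
--     """Root docs first, then core, then plugins, then interfaces, then rest."""
--     order = {"." : 0, "core": 1}
--     for k, v in order.items():
--         if source == k:
--             return (v, source)
--     if source.startswith("core/"):
--         return (2, source)
--     if source.startswith("plugins/"):
--         return (4, source)
--     if source.startswith("interfaces/"):
--         return (5, source)
--     return (3, source)
-- ===== SOURCE B (Python) =====
-- def _source_sort_key(source: str) -> tuple[int, str]: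
--     """Root docs first, then core, then plugins, then interfaces, then rest."""
--     if source == ".":
--         return (0, source)
--     if source == "core":
--         return (1, source)
--     if "/" in source:
--         order = {"core": 2, "plugins": 4, "interfaces": 5}
--         head = source.split("/", 1)[0]
--         return (order.get(head, 3), source)
--     return (3, source)
-- ===== Notes on version B (the rewrite author's own statement) =====
-- stated objective: idiomatic
-- what changed: Replaces A's dict scan plus a chain of startswith tests by two exact-match checks and a single split-head lookup in an order table, gated on the source containing a slash.
import Mathlib
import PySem

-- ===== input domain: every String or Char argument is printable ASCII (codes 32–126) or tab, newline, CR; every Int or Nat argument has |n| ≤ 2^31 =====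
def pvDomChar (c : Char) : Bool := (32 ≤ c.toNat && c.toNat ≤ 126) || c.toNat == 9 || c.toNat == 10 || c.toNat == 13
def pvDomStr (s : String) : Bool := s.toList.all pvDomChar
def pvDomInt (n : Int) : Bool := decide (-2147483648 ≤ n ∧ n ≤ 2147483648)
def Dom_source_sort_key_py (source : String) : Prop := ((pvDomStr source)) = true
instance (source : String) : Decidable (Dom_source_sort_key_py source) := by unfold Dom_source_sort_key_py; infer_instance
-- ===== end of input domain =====

-- B replaces A's dict scan + chain of startswith tests by two exact checks and a single
-- split-head table lookup (objective: idiomatic/alternative decomposition).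

-- ===== PORT A =====
def source_sort_key_py (source : String) : Int × String :=
  -- order = {".": 0, "core": 1}; for k, v in order.items(): if source == k: return (v, source)
  match ([(("." : String), (0 : Int)), ("core", 1)]).find? (fun kv => source == kv.1) with
  | some kv => (kv.2, source)
  | none =>
    if PySem.Str.startswith source "core/" then (2, source)
    else if PySem.Str.startswith source "plugins/" then (4, source)
    else if PySem.Str.startswith source "interfaces/" then (5, source)
    else (3, source)

-- ===== PORT B =====
def source_sort_key_py_alt (source : String) : Int × String :=
  if source == "." then (0, source)
  else if source == "core" then (1, source)
  else if PySem.Str.isIn "/" source then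
    let order : PySem.Dict String Int := PySem.Dict.ofList [("core", 2), ("plugins", 4), ("interfaces", 5)]
    -- head of source.split('/', 1): everything before the first '/' (exact: '/' is present here)
    let head := String.ofList (source.toList.takeWhile (· != '/'))
    (order.getD head 3, source)
  else (3, source)

-- ===== PRECONDITION & SPEC =====
def Spec_source_sort_key_py (source : String) (out : Int × String) : Prop := out = source_sort_key_py_alt source
instance (source : String) (out : Int × String) : Decidable (Spec_source_sort_key_py source out) := by unfold Spec_source_sort_key_py; infer_instance

-- ===== CLAIM (what is proved, stated in full; the proofs are below) =====
def Claim_equal_source_sort_key_py : Prop := ∀ (source : String), Dom_source_sort_key_py source → Spec_source_sort_key_py source (source_sort_key_py source)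

-- ===== LEMMAS AND PROOFS =====

-- When '/' occurs in cs, A's test `cs.startswith (w ++ "/")` (for a slash-free w) holds
-- exactly when B's split head (the maximal slash-free prefix) equals w.
theorem startswith_slash_iff_takeWhile (cs w : List Char) (hw : '/' ∉ w) (hcs : '/' ∈ cs) :
    PySem.Chars.startswith cs (w ++ ['/']) = true ↔ cs.takeWhile (· != '/') = w := by
  rw [PySem.Chars.startswith_iff]
  constructor
  · rintro ⟨t, ht⟩
    subst ht
    rw [List.append_assoc, List.singleton_append, List.takeWhile_append]
    have hall : List.takeWhile (fun c => c != '/') w = w := by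
      rw [List.takeWhile_eq_self_iff]
      intro c hc
      simp only [bne_iff_ne, ne_eq]
      exact fun h => hw (h ▸ hc)
    rw [hall]
    simp
  · intro h
    have hsplit := List.takeWhile_append_dropWhile (p := fun c => c != '/') (l := cs)
    cases hdd : List.dropWhile (fun c => c != '/') cs with
    | nil =>
      exfalso
      rw [hdd, List.append_nil] at hsplit
      rw [← hsplit] at hcs
      have := List.mem_takeWhile_imp hcs
      simp at this
    | cons c t =>
      have hc : c = '/' := by
        have hh := List.head?_dropWhile_not (fun c => c != '/') cs
        rw [hdd] at hh
        simpa using hh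
      refine ⟨t, ?_⟩
      rw [← hsplit, hdd, h, hc, List.append_assoc, List.singleton_append]

-- Lookup in B's literal order table, characterised by the three key comparisons.
theorem getD_order (tw : List Char) :
    (PySem.Dict.ofList [(("core" : String), (2 : Int)), ("plugins", 4), ("interfaces", 5)]).getD (String.ofList tw) 3 =
    if tw = "core".toList then 2 else if tw = "plugins".toList then 4 else if tw = "interfaces".toList then 5 else 3 := by
  rw [show (PySem.Dict.ofList [(("core" : String), (2 : Int)), ("plugins", 4), ("interfaces", 5)]) =
        ((PySem.Dict.empty.insert "core" 2).insert "plugins" 4).insert "interfaces" 5 from rfl]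
  rw [PySem.Dict.getD_insert, PySem.Dict.getD_insert, PySem.Dict.getD_insert, PySem.Dict.getD_empty]
  rw [show ("interfaces" : String) = String.ofList "interfaces".toList from rfl,
      show ("plugins" : String) = String.ofList "plugins".toList from rfl,
      show ("core" : String) = String.ofList "core".toList from rfl]
  simp only [String.ofList_inj]
  split_ifs <;> simp_all

-- ===== VERDICT (by name: the statement is the Claim_ definition above) =====
theorem source_sort_key_py_spec : Claim_equal_source_sort_key_py := by
  intro source _
  unfold Spec_source_sort_key_py source_sort_key_py source_sort_key_py_alt
  by_cases h0 : source = "."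
  · subst h0; decide
  by_cases h1 : source = "core"
  · subst h1; decide
  have e0 : (source == ".") = false := beq_eq_false_iff_ne.mpr h0
  have e1 : (source == "core") = false := beq_eq_false_iff_ne.mpr h1
  simp only [List.find?, e0, e1, Bool.false_eq_true, if_false]
  by_cases hs : '/' ∈ source.toList
  · have hin : PySem.Str.isIn "/" source = true := by
      rw [PySem.Str.isIn_iff_infix]
      exact (List.singleton_infix_iff _ _).mpr hs
    have hiff : ∀ (w : List Char), '/' ∉ w →
        (PySem.Chars.startswith source.toList (w ++ ['/']) = true ↔ source.toList.takeWhile (· != '/') = w) :=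
      fun w hw => startswith_slash_iff_takeWhile source.toList w hw hs
    have bsw : ∀ (p : String) (w : List Char), p.toList = w ++ ['/'] → '/' ∉ w →
        PySem.Str.startswith source p = decide (source.toList.takeWhile (· != '/') = w) := by
      intro p w hp hw
      have h := hiff w hw
      rw [PySem.Str.startswith_eq, hp]
      by_cases hc : source.toList.takeWhile (· != '/') = w
      · simp [h.mpr hc, hc]
      · simp only [hc, decide_false]
        rw [Bool.eq_false_iff]
        exact fun hst => hc (h.mp hst)
    rw [bsw "core/" "core".toList rfl (by decide),
        bsw "plugins/" "plugins".toList rfl (by decide),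
        bsw "interfaces/" "interfaces".toList rfl (by decide), hin]
    simp only [if_true, getD_order, decide_eq_true_eq]
    split_ifs <;> rfl
  · have hin : PySem.Str.isIn "/" source = false := by
      rw [Bool.eq_false_iff]
      intro h
      exact hs (((PySem.Str.isIn_iff_infix _ _).mp h).sublist.subset (by decide))
    have nsw : ∀ (p : String), '/' ∈ p.toList → PySem.Str.startswith source p = false := by
      intro p hp
      rw [PySem.Str.startswith_eq, Bool.eq_false_iff]
      intro hst
      exact hs (((PySem.Chars.startswith_iff _ _).mp hst).sublist.subset hp)
    rw [nsw "core/" (by decide), nsw "plugins/" (by decide), nsw "interfaces/" (by decide), hin]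
    simp
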